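-- pv_equiv track=rewrite | github.com/Hoony0321/Algorithm | 2022_01/08/kakao_recruitment_2018_1차_비밀지도.py | solution
-- ===== SOURCE A (Python) =====
-- def solution(n, arr1, arr2):
--     answer = []
--
--     for idx in range(n):
--         str = '';
--         result = arr1[idx] | arr2[idx];
--         for i in range(n-1,-1,-1):
--             if result & (1 << i) == 0:
--                 str += ' ';
--             else:
--                 str += '#';
--
--         answer.append(str);
--
--
--
--
--     return answer
-- ===== SOURCE B (Python) =====
-- def solution(n, arr1, arr2):
--     if n <= 0:
--         return []
--     mask = (1 << n) - 1
--     table = str.maketrans('01', ' #')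
--     return [format((a | b) & mask, '0{}b'.format(n)).translate(table)
--             for a, b in zip(arr1[:n], arr2[:n])]
-- ===== Notes on version B (the rewrite author's own statement) =====
-- stated objective: idiomatic
-- what changed: The per-bit inner loop with shift-and-mask tests is replaced by masking the OR once to n bits and rendering each row in one formatting step (zero-padded binary via format plus a character translation), mapped over the zipped n-prefixes of the two arrays.
import Mathlib
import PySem

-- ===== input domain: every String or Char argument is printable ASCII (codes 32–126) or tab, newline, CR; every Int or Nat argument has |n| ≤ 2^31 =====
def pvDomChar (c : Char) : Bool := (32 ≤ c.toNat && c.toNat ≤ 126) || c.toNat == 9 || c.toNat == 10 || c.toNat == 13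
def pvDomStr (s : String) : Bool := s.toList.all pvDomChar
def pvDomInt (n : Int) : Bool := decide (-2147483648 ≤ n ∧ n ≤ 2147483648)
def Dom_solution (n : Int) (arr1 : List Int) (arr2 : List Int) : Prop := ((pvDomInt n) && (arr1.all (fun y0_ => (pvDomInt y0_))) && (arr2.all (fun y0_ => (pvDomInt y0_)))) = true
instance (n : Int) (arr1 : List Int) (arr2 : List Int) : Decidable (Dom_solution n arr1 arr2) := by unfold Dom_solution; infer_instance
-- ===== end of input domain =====

-- B renders each row by one zero-padded binary formatting step over the masked OR instead of A's
-- per-bit shift-and-mask inner loop; equivalence of the return values is proved on Pre_ below.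

-- ===== PORT A =====
def solution (n : Int) (arr1 : List Int) (arr2 : List Int) : List String :=
  (PySem.List.pyRange 0 n 1).foldl (fun answer idx =>
    match PySem.List.pyGet? arr1 idx, PySem.List.pyGet? arr2 idx with
    | some a, some b =>
      let result := PySem.Int.bor a b
      let s := (PySem.List.pyRange (n - 1) (-1) (-1)).foldl
        (fun s i =>
          -- i ≥ 0 on every iteration, so Python's '1 << i' is '(1:Int) <<< i.toNat' exactly
          if PySem.Int.band result ((1 : Int) <<< i.toNat) = 0 then s ++ [' '] else s ++ ['#'])
        ([] : List Char)
      answer ++ [String.ofList s]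
    | _, _ => answer)  -- unreachable under Pre_solution (Python raises IndexError here)
    []

-- ===== PORT B =====
-- the str.maketrans('01', ' #') table of Source B as a per-character map
def pyTranslate01 (c : Char) : Char := if c = '0' then ' ' else if c = '1' then '#' else c

def solution_alt (n : Int) (arr1 : List Int) (arr2 : List Int) : List String :=
  if n ≤ 0 then []
  else
    let mask : Int := ((1 : Int) <<< n.toNat) - 1
    ((arr1.take n.toNat).zip (arr2.take n.toNat)).map (fun p =>
      let r := PySem.Int.band (PySem.Int.bor p.1 p.2) mask
      -- format(r, '0{}b'.format(n)) with r ≥ 0: binary digits left-padded with '0' to width n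
      let s := PySem.Int.toBinChars r
      String.ofList ((List.replicate (n.toNat - s.length) '0' ++ s).map pyTranslate01))

-- ===== PRECONDITION & SPEC =====
-- Pre_ excludes exactly the inputs where Python A raises IndexError: an index below n missing
-- from arr1 or arr2.
def Pre_solution (n : Int) (arr1 : List Int) (arr2 : List Int) : Prop :=
  n ≤ (arr1.length : Int) ∧ n ≤ (arr2.length : Int)
instance (n : Int) (arr1 : List Int) (arr2 : List Int) : Decidable (Pre_solution n arr1 arr2) := by
  unfold Pre_solution; infer_instance

def pvWitness_solution : Int × List Int × List Int := (2, [1, 2], [2, 1])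

def Spec_solution (n : Int) (arr1 : List Int) (arr2 : List Int) (out : List String) : Prop :=
  out = solution_alt n arr1 arr2
instance (n : Int) (arr1 : List Int) (arr2 : List Int) (out : List String) :
    Decidable (Spec_solution n arr1 arr2 out) := by unfold Spec_solution; infer_instance

-- ===== CLAIM (what is proved, stated in full; the proofs are below) =====
def Claim_equal_solution : Prop := ∀ (n : Int) (arr1 : List Int) (arr2 : List Int),
  Dom_solution n arr1 arr2 → Pre_solution n arr1 arr2 →
  Spec_solution n arr1 arr2 (solution n arr1 arr2)

-- ===== LEMMAS AND PROOFS =====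

theorem one_shl (k : Nat) : (1 : Int) <<< k = ((2 ^ k : Nat) : Int) := by
  simp [Int.shiftLeft_eq]

theorem shl_sub_one (k : Nat) : (1 : Int) <<< k - 1 = ((2 ^ k - 1 : Nat) : Int) := by
  rw [one_shl]
  have : (1:Nat) ≤ 2 ^ k := Nat.one_le_two_pow
  push_cast [this]
  ring

-- the low k bits of x, as the Nat Python's (x & ((1 << k) - 1)) denotes
def maskBits (x : Int) (k : Nat) : Nat := (PySem.Int.band x (((1 : Int) <<< k) - 1)).toNat

theorem maskBits_ofNat (m k : Nat) : maskBits (Int.ofNat m) k = m % 2 ^ k := by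
  unfold maskBits
  rw [shl_sub_one, Int.ofNat_eq_natCast,
    PySem.Int.band_of_nonneg (Int.natCast_nonneg m) (Int.natCast_nonneg _),
    Int.toNat_natCast, Int.toNat_natCast, Int.toNat_natCast,
    Nat.and_two_pow_sub_one_eq_mod]

theorem band_negSucc (m : Nat) (b : Int) (hb : 0 ≤ b) :
    PySem.Int.band (Int.negSucc m) b = ((b.toNat - (b.toNat &&& m) : Nat) : Int) := by
  show PySem.Int.band (Int.negSucc m) b = _
  unfold PySem.Int.band
  have h1 : ¬ (0 ≤ Int.negSucc m) := by omega
  have h2 : (-(Int.negSucc m) - 1).toNat = m := by omega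
  simp [h1, hb, h2]

theorem maskBits_negSucc (m k : Nat) :
    maskBits (Int.negSucc m) k = 2 ^ k - (m % 2 ^ k + 1) := by
  unfold maskBits
  rw [shl_sub_one, band_negSucc m _ (Int.natCast_nonneg _)]
  rw [Int.toNat_natCast, Int.toNat_natCast, Nat.and_comm, Nat.and_two_pow_sub_one_eq_mod]
  have h := Nat.mod_lt m (Nat.two_pow_pos k)
  omega

theorem maskBits_lt (x : Int) (k : Nat) : maskBits x k < 2 ^ k := by
  have hpos : 0 < 2 ^ k := Nat.two_pow_pos k
  cases x with
  | ofNat m => rw [maskBits_ofNat]; exact Nat.mod_lt m hpos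
  | negSucc m => rw [maskBits_negSucc]; omega

-- bit i of the masked value decides A's shift-and-mask test (i < k)
theorem band_pow_eq_zero_iff (x : Int) (k i : Nat) (hik : i < k) :
    PySem.Int.band x ((1 : Int) <<< i) = 0 ↔ (maskBits x k).testBit i = false := by
  rw [one_shl]
  cases x with
  | ofNat m =>
    rw [maskBits_ofNat, Int.ofNat_eq_natCast,
      PySem.Int.band_of_nonneg (Int.natCast_nonneg m) (Int.natCast_nonneg _),
      Int.toNat_natCast, Int.toNat_natCast, Nat.and_two_pow]
    rw [Nat.testBit_mod_two_pow]
    simp only [hik, decide_true, Bool.true_and]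
    cases h : m.testBit i <;> simp [h, (Nat.two_pow_pos i).ne']
  | negSucc m =>
    rw [maskBits_negSucc, band_negSucc m _ (Int.natCast_nonneg _)]
    have hm : m % 2 ^ k < 2 ^ k := Nat.mod_lt m (Nat.two_pow_pos k)
    have htb : (2 ^ k - (m % 2 ^ k + 1)).testBit i = !(m.testBit i) := by
      rw [Nat.testBit_two_pow_sub_succ hm, Nat.testBit_mod_two_pow]
      simp [hik]
    rw [htb, Int.toNat_natCast, Nat.and_comm, Nat.and_two_pow]
    have hpow := (Nat.two_pow_pos i).ne'
    cases h : m.testBit i <;> simp [h] <;> omega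

-- MSB-first row of width k: the characters A and B both produce for value m
def rowSpec : Nat → Nat → List Char
  | 0, _ => []
  | k + 1, m => rowSpec k (m / 2) ++ [if m % 2 = 1 then '#' else ' ']

theorem rowSpec_zero (k : Nat) : rowSpec k 0 = List.replicate k ' ' := by
  induction k with
  | zero => rfl
  | succ k ih => rw [rowSpec, ih, List.replicate_succ']; norm_num

theorem rowSpec_eq_map (k m : Nat) :
    rowSpec k m = (List.range k).map (fun j => if m.testBit (k - 1 - j) then '#' else ' ') := by
  induction k generalizing m with
  | zero => rfl
  | succ k ih =>
    rw [rowSpec, ih, List.range_succ, List.map_append]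
    congr 1
    · apply List.map_congr_left
      intro j hj
      have hj' : j < k := List.mem_range.mp hj
      have : (m / 2).testBit (k - 1 - j) = m.testBit (k + 1 - 1 - j) := by
        rw [Nat.testBit_div_two]
        congr 1
        omega
      rw [this]
    · simp only [List.map_cons, List.map_nil]
      congr 1
      have hz : k + 1 - 1 - k = 0 := by omega
      rw [hz, Nat.testBit_zero]
      cases h : decide (m % 2 = 1) <;> simp_all

-- binary digits of m, MSB first, as Nat.toDigits 2 produces them
def binRec (m : Nat) : List Char :=
  if m / 2 = 0 then [(m % 2).digitChar]
  else binRec (m / 2) ++ [(m % 2).digitChar]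
decreasing_by omega

theorem toDigitsCore_eq_binRec (f : Nat) : ∀ (m : Nat) (l : List Char), m < 2 ^ (f + 1) →
    Nat.toDigitsCore 2 (f + 1) m l = binRec m ++ l := by
  induction f with
  | zero =>
    intro m l hm
    have h2 : m / 2 = 0 := by omega
    rw [Nat.toDigitsCore, binRec]
    simp [h2]
  | succ f ih =>
    intro m l hm
    rw [Nat.toDigitsCore, binRec]
    by_cases h2 : m / 2 = 0
    · simp [h2]
    · simp only [h2, if_false]
      rw [ih (m / 2) _ (by
        have := Nat.pow_succ 2 (f + 1)
        omega)]
      simp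

theorem toDigits_eq_binRec (m : Nat) : Nat.toDigits 2 m = binRec m := by
  have h : m < 2 ^ (m + 1) := Nat.lt_two_pow_self.trans_le (Nat.pow_le_pow_right (by norm_num) (by omega))
  cases m with
  | zero => rw [Nat.toDigits, toDigitsCore_eq_binRec 0 0 [] (by norm_num)]; simp
  | succ m' =>
    rw [Nat.toDigits, toDigitsCore_eq_binRec (m' + 1) (m' + 1) [] h]
    simp

theorem translate_digitChar (m : Nat) :
    pyTranslate01 ((m % 2).digitChar) = if m % 2 = 1 then '#' else ' ' := by
  rcases Nat.mod_two_eq_zero_or_one m with h | h <;> rw [h] <;> decide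

-- B's padded formatted row equals rowSpec
theorem pad_binRec_eq_rowSpec (k : Nat) : ∀ m : Nat, m < 2 ^ (k + 1) →
    (List.replicate ((k + 1) - (binRec m).length) '0' ++ binRec m).map pyTranslate01
      = rowSpec (k + 1) m := by
  induction k with
  | zero =>
    intro m hm
    have h0 : binRec 0 = ['0'] := by rw [binRec]; simp; decide
    have h1 : binRec 1 = ['1'] := by rw [binRec]; simp; decide
    interval_cases m <;> simp [h0, h1, rowSpec, pyTranslate01] <;> decide
  | succ k ih =>
    intro m hm
    rw [rowSpec]
    by_cases h2 : m / 2 = 0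
    · have hb : binRec m = [(m % 2).digitChar] := by rw [binRec]; simp [h2]
      rw [hb, h2, rowSpec_zero]
      simp only [List.length_cons, List.length_nil, List.map_append, List.map_replicate,
        List.map_cons, List.map_nil, translate_digitChar]
      congr 1
    · have hb : binRec m = binRec (m / 2) ++ [(m % 2).digitChar] := by rw [binRec]; simp [h2]
      rw [hb]
      have hlt : m / 2 < 2 ^ (k + 1) := by
        have := Nat.pow_succ 2 (k + 1)
        omega
      have hih := ih (m / 2) hlt
      rw [List.length_append, List.length_cons, List.length_nil]
      have hpad : (k + 1 + 1) - ((binRec (m / 2)).length + 1) = (k + 1) - (binRec (m / 2)).length := by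
        omega
      rw [hpad, ← List.append_assoc, List.map_append, hih, List.map_cons, List.map_nil,
        translate_digitChar]

-- fold that appends one character per element is a map
theorem foldl_append_one {α β : Type} (g : α → β) (l : List α) (acc : List β) :
    l.foldl (fun s x => s ++ [g x]) acc = acc ++ l.map g := by
  induction l generalizing acc with
  | nil => simp
  | cons x xs ih => simp [List.foldl_cons, ih]

-- fold whose body branches between two one-character appends is a map
theorem foldl_if_append {α : Type} (P : α → Prop) [DecidablePred P] (u v : Char)
    (l : List α) (acc : List Char) :
    l.foldl (fun s x => if P x then s ++ [u] else s ++ [v]) acc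
      = acc ++ l.map (fun x => if P x then u else v) := by
  induction l generalizing acc with
  | nil => simp
  | cons x xs ih =>
    simp only [List.foldl_cons, List.map_cons]
    split <;> rw [ih] <;> simp

-- A's inner per-bit loop produces exactly the width-k row of the masked value
theorem rowA_eq (x : Int) (k : Nat) :
    (PySem.List.pyRange ((k : Int) - 1) (-1) (-1)).foldl
      (fun s i => if PySem.Int.band x ((1 : Int) <<< i.toNat) = 0 then s ++ [' '] else s ++ ['#'])
      ([] : List Char)
    = rowSpec k (maskBits x k) := by
  rw [PySem.List.pyRange_neg_one]
  have harg : ((k : Int) - 1 - -1).toNat = k := by omega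
  rw [harg, List.foldl_map, foldl_if_append, List.nil_append, rowSpec_eq_map]
  apply List.map_congr_left
  intro j hj
  have hj' : j < k := List.mem_range.mp hj
  have hidx : ((k : Int) - 1 - (j : Nat)).toNat = k - 1 - j := by omega
  rw [hidx]
  have hik : k - 1 - j < k := by omega
  rw [Int.shiftLeft_natCast_right]
  rcases h : (maskBits x k).testBit (k - 1 - j) with _ | _
  · rw [if_pos ((band_pow_eq_zero_iff x k _ hik).mpr h)]; simp
  · rw [if_neg (by
      intro hz
      rw [(band_pow_eq_zero_iff x k _ hik).mp hz] at h
      exact Bool.false_ne_true h)]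
    simp

-- B's formatted row for x masked to width k (k ≥ 1)
theorem rowB_eq (x : Int) (k : Nat) (hk : 0 < k) :
    (List.replicate (k - (PySem.Int.toBinChars (PySem.Int.band x (((1 : Int) <<< k) - 1))).length) '0'
      ++ PySem.Int.toBinChars (PySem.Int.band x (((1 : Int) <<< k) - 1))).map pyTranslate01
    = rowSpec k (maskBits x k) := by
  have hnn : 0 ≤ PySem.Int.band x (((1 : Int) <<< k) - 1) := by
    rw [PySem.Int.band_comm]
    exact PySem.Int.band_nonneg_of_nonneg_left x (by rw [shl_sub_one]; exact Int.natCast_nonneg _)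
  have hbin : PySem.Int.toBinChars (PySem.Int.band x (((1 : Int) <<< k) - 1))
      = binRec (maskBits x k) := by
    unfold PySem.Int.toBinChars
    rw [if_neg (by omega)]
    exact toDigits_eq_binRec _
  rw [hbin]
  obtain ⟨k', rfl⟩ : ∃ k', k = k' + 1 := ⟨k - 1, by omega⟩
  exact pad_binRec_eq_rowSpec k' (maskBits x (k' + 1)) (maskBits_lt x (k' + 1))

theorem solution_spec' (n : Int) (arr1 : List Int) (arr2 : List Int)
    (h1 : n ≤ (arr1.length : Int)) (h2 : n ≤ (arr2.length : Int)) :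
    solution n arr1 arr2 = solution_alt n arr1 arr2 := by
  by_cases hn : n ≤ 0
  · unfold solution solution_alt
    rw [PySem.List.pyRange_one_eq_nil hn, if_pos hn]
    rfl
  · push_neg at hn
    set k := n.toNat with hk
    have hkn : (k : Int) = n := by omega
    have hk1 : k ≤ arr1.length := by omega
    have hk2 : k ≤ arr2.length := by omega
    have hkpos : 0 < k := by omega
    -- the common value: row j rendered from the masked OR of the j-th entries
    set g : Nat → String := fun j =>
      String.ofList (rowSpec k (maskBits (PySem.Int.bor (arr1.getD j 0) (arr2.getD j 0)) k))
      with hg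
    have hA : solution n arr1 arr2 = (List.range k).map g := by
      unfold solution
      rw [PySem.List.pyRange_one]
      have harg : (n - 0).toNat = k := by omega
      rw [harg, List.foldl_map]
      have hcong : ∀ (acc : List String) (j : Nat), j ∈ List.range k →
          (fun (answer : List String) (idx : Int) =>
            match PySem.List.pyGet? arr1 idx, PySem.List.pyGet? arr2 idx with
            | some a, some b =>
              answer ++ [String.ofList ((PySem.List.pyRange (n - 1) (-1) (-1)).foldl
                (fun s i => if PySem.Int.band (PySem.Int.bor a b) ((1 : Int) <<< i.toNat) = 0
                            then s ++ [' '] else s ++ ['#']) ([] : List Char))]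
            | _, _ => answer) acc ((0 : Int) + (j : Int))
          = acc ++ [g j] := by
        intro acc j hj
        have hj' : j < k := List.mem_range.mp hj
        have e0 : (0 : Int) + (j : Int) = ((j : Nat) : Int) := by omega
        have g1 : PySem.List.pyGet? arr1 ((j : Nat) : Int) = some (arr1[j]'(by omega)) := by
          rw [PySem.List.pyGet?_natCast, List.getElem?_eq_getElem (by omega)]
        have g2 : PySem.List.pyGet? arr2 ((j : Nat) : Int) = some (arr2[j]'(by omega)) := by
          rw [PySem.List.pyGet?_natCast, List.getElem?_eq_getElem (by omega)]
        rw [e0]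
        simp only [g1, g2, hg]
        have hrow := rowA_eq (PySem.Int.bor (arr1[j]'(by omega)) (arr2[j]'(by omega))) k
        rw [hkn] at hrow
        rw [hrow, List.getD_eq_getElem arr1 0 (by omega), List.getD_eq_getElem arr2 0 (by omega)]
      rw [PySem.List.foldl_congr_mem _ _ (fun acc j => acc ++ [g j]) _
        (fun acc j hj => hcong acc j hj)]
      rw [foldl_append_one]
      rfl
    have hB : solution_alt n arr1 arr2 = (List.range k).map g := by
      unfold solution_alt
      rw [if_neg (by omega)]
      apply List.ext_getElem
      · simp [hk1]
        omega
      · intro j hja hjb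
        have hj' : j < k := by
          simp at hja
          omega
        rw [List.getElem_map, List.getElem_map, List.getElem_range]
        simp only [List.getElem_zip, List.getElem_take, hg]
        have := rowB_eq (PySem.Int.bor (arr1[j]'(by omega)) (arr2[j]'(by omega))) k hkpos
        rw [List.getD_eq_getElem arr1 0 (by omega), List.getD_eq_getElem arr2 0 (by omega)]
        rw [← this]
    rw [hA, hB]

-- ===== VERDICT (by name: the statement is the Claim_ definition above) =====
theorem solution_spec : Claim_equal_solution := by
  intro n arr1 arr2 _ hpre
  exact solution_spec' n arr1 arr2 hpre.1 hpre.2
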